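-- pv_equiv track=rewrite | github.com/YimingLin19/pyfem-v2-update | src/pyfem/post/common.py | resolve_uniform_measure_value
-- ===== SOURCE A (Python) =====
-- from collections.abc import Mapping, Sequence
--
-- MEASURE_VALUE_UNSPECIFIED = "unspecified"
--
-- MEASURE_VALUE_MIXED = "mixed"
--
-- def normalize_measure_value(value: str | None) -> str:
--     """规范化单个测度标签。"""
--
--     if value is None:
--         return MEASURE_VALUE_UNSPECIFIED
--     normalized_value = str(value).strip()
--     if not normalized_value:
--         return MEASURE_VALUE_UNSPECIFIED
--     return normalized_value
--
-- def resolve_uniform_measure_value(values: Sequence[str]) -> str: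
--     """将一组测度标签归并为统一值。"""
--
--     normalized_values = tuple(
--         dict.fromkeys(normalize_measure_value(value) for value in values if normalize_measure_value(value))
--     )
--     if not normalized_values:
--         return MEASURE_VALUE_UNSPECIFIED
--     if len(normalized_values) == 1:
--         return normalized_values[0]
--     return MEASURE_VALUE_MIXED
-- ===== SOURCE B (Python) =====
-- MEASURE_VALUE_UNSPECIFIED = "unspecified"
-- MEASURE_VALUE_MIXED = "mixed"
--
-- def normalize_measure_value(value):
--     if value is None:
--         return MEASURE_VALUE_UNSPECIFIED
--     normalized_value = str(value).strip()
--     if not normalized_value: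
--         return MEASURE_VALUE_UNSPECIFIED
--     return normalized_value
--
-- def resolve_uniform_measure_value(values):
--     result = MEASURE_VALUE_UNSPECIFIED
--     seen = False
--     for value in values:
--         nv = normalize_measure_value(value)
--         if not seen:
--             result = nv
--             seen = True
--         elif nv != result:
--             return MEASURE_VALUE_MIXED
--     return result
-- ===== Notes on version B (the rewrite author's own statement) =====
-- stated objective: simpler
-- what changed: Replaces the dedup-dict construction (build an ordered set of all distinct normalized labels, then case on its size) with a single streaming pass keeping only the first normalized label and a seen flag, returning 'mixed' as soon as a second distinct label appears.
import Mathlib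
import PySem

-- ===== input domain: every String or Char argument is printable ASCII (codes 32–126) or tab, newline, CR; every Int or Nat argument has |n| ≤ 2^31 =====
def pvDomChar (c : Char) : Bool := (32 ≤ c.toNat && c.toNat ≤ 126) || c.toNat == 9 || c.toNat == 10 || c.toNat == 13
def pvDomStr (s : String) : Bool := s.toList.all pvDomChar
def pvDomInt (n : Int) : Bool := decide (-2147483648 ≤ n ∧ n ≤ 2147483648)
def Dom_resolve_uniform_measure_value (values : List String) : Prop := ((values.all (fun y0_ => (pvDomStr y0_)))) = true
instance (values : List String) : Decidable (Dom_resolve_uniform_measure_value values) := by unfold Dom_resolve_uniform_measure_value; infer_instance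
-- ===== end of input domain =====

-- B replaces A's ordered-dedup construction with one streaming pass (running label + seen flag, early 'mixed' exit); objective: simpler.

-- ===== PORT A =====
-- shared module helper normalize_measure_value (None impossible here: the argument is a string)
def normalize_measure_value (value : String) : String :=
  let normalized_value := PySem.Str.strip value
  if normalized_value = "" then "unspecified" else normalized_value

def resolve_uniform_measure_value (values : List String) : String :=
  let normalized_values :=
    PySem.List.dedup
      ((values.filter (fun v => !(normalize_measure_value v == ""))).map normalize_measure_value)
  if normalized_values = [] then "unspecified"
  else if normalized_values.length = 1 then normalized_values.headD ""
  else "mixed"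

-- ===== PORT B =====
-- the for-loop of Source B: state (result, seen); early return on a second distinct label
def altGo (result : String) (seen : Bool) : List String → String
  | [] => result
  | v :: rest =>
    let nv := normalize_measure_value v
    if !seen then altGo nv true rest
    else if nv ≠ result then "mixed"
    else altGo result seen rest

def resolve_uniform_measure_value_alt (values : List String) : String :=
  altGo "unspecified" false values

-- ===== PRECONDITION & SPEC =====
def Spec_resolve_uniform_measure_value (values : List String) (out : String) : Prop := out = resolve_uniform_measure_value_alt values
instance (values : List String) (out : String) : Decidable (Spec_resolve_uniform_measure_value values out) := by unfold Spec_resolve_uniform_measure_value; infer_instance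

-- ===== CLAIM (what is proved, stated in full; the proofs are below) =====
def Claim_equal_resolve_uniform_measure_value : Prop := ∀ (values : List String), Dom_resolve_uniform_measure_value values → Spec_resolve_uniform_measure_value values (resolve_uniform_measure_value values)

-- ===== LEMMAS AND PROOFS =====

lemma normalize_ne_empty (v : String) : normalize_measure_value v ≠ "" := by
  simp only [normalize_measure_value]
  split <;> simp_all

lemma filter_normalize_eq_self (values : List String) :
    values.filter (fun v => !(normalize_measure_value v == "")) = values := by
  apply List.filter_eq_self.mpr
  intro v _
  simp [normalize_ne_empty]

lemma altGo_true (r : String) (l : List String) :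
    altGo r true l = if l.all (fun v => normalize_measure_value v == r) then r else "mixed" := by
  induction l with
  | nil => simp [altGo]
  | cons v t ih =>
    by_cases h : normalize_measure_value v = r <;> simp [altGo, ih, h]

lemma dedup_eq_singleton_of_all_eq (n0 : String) (L : List String)
    (hmem : n0 ∈ L) (hall : ∀ x ∈ L, x = n0) : PySem.List.dedup L = [n0] := by
  have hnd := PySem.List.nodup_dedup L
  have hsub : ∀ x ∈ PySem.List.dedup L, x = n0 := fun x hx =>
    hall x ((PySem.List.mem_dedup _ _).1 hx)
  have hne : n0 ∈ PySem.List.dedup L := (PySem.List.mem_dedup _ _).2 hmem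
  match hD : PySem.List.dedup L with
  | [] => rw [hD] at hne; simp at hne
  | [a] => rw [hD] at hsub; simp_all
  | a :: b :: t =>
    rw [hD] at hsub hnd
    have ha := hsub a (by simp)
    have hb := hsub b (by simp)
    rw [List.nodup_cons] at hnd
    exact absurd (by simp [ha, hb] : a ∈ b :: t) hnd.1

-- ===== VERDICT (by name: the statement is the Claim_ definition above) =====
theorem resolve_uniform_measure_value_spec : Claim_equal_resolve_uniform_measure_value := by
  intro values _
  unfold Spec_resolve_uniform_measure_value resolve_uniform_measure_value resolve_uniform_measure_value_alt
  rw [filter_normalize_eq_self]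
  cases values with
  | nil => simp [altGo]
  | cons v rest =>
    set n0 := normalize_measure_value v with hn0
    have hB : altGo "unspecified" false (v :: rest)
        = if rest.all (fun w => normalize_measure_value w == n0) then n0 else "mixed" := by
      simp [altGo, altGo_true, hn0]
    rw [hB]
    set L := (v :: rest).map normalize_measure_value with hL
    have hn0mem : n0 ∈ L := by simp [hL, hn0]
    by_cases hall : rest.all (fun w => normalize_measure_value w == n0)
    · -- all labels agree: dedup is the singleton [n0]
      have hallL : ∀ x ∈ L, x = n0 := by
        intro x hx
        simp only [hL, List.mem_map, List.mem_cons] at hx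
        obtain ⟨w, hw | hw, hx⟩ := hx
        · rw [← hx, hw]
        · have := (List.all_eq_true.1 hall) w hw
          simp at this
          rw [← hx, this]
      rw [dedup_eq_singleton_of_all_eq n0 L hn0mem hallL]
      simp [hall]
    · -- a second distinct label exists: dedup has ≥ 2 elements
      simp only [List.all_eq_true] at hall
      push Not at hall
      obtain ⟨w, hw, hwne⟩ := hall
      have hwne' : normalize_measure_value w ≠ n0 := by simpa using hwne
      have hx : normalize_measure_value w ∈ PySem.List.dedup L :=
        (PySem.List.mem_dedup _ _).2 (by simp [hL, List.mem_map]; exact Or.inr ⟨w, hw, rfl⟩)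
      have hn0d : n0 ∈ PySem.List.dedup L := (PySem.List.mem_dedup _ _).2 hn0mem
      have hifall : ¬ rest.all (fun w => normalize_measure_value w == n0) := by
        simp only [List.all_eq_true]
        push Not
        exact ⟨w, hw, by simpa using hwne'⟩
      rw [if_neg hifall]
      match hD : PySem.List.dedup L with
      | [] => rw [hD] at hn0d; simp at hn0d
      | [a] =>
        rw [hD] at hn0d hx
        simp at hn0d hx
        exact absurd (hx.trans hn0d.symm) hwne'
      | a :: b :: t => simp
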